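-- pv_equiv track=rewrite | github.com/rudra-dotcom/DL-Project | Rudra's contribution/model/repvit.py | _stage_ranges
-- ===== SOURCE A (Python) =====
-- def _stage_ranges(cfgs):
--     ranges = []
--     start = 0
--     current_channels = cfgs[0][2]
--     for idx, cfg in enumerate(cfgs[1:], start=1):
--         if cfg[2] != current_channels:
--             ranges.append((start, idx))
--             start = idx
--             current_channels = cfg[2]
--     ranges.append((start, len(cfgs)))
--     return ranges
-- ===== SOURCE B (Python) =====
-- def _stage_ranges(cfgs):
--     # stage 1: run-length decomposition — for each maximal block of rows with
--     # equal channel count, record its length (two-pointer chunk scan)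
--     n = len(cfgs)
--     lengths = []
--     i = 0
--     while i < n:
--         ch = cfgs[i][2]
--         j = i + 1
--         while j < n and cfgs[j][2] == ch:
--             j += 1
--         lengths.append(j - i)
--         i = j
--     # stage 2: prefix-sum the run lengths into (start, end) ranges
--     ranges = []
--     start = 0
--     for m in lengths:
--         ranges.append((start, start + m))
--         start += m
--     return ranges
-- ===== Notes on version B (the rewrite author's own statement) =====
-- stated objective: alternative
-- what changed: B is a two-stage run-length decomposition: an outer two-pointer chunk scan finds each maximal block of equal channel count and records its length, and a separate prefix-sum pass turns the length list into (start, end) ranges, instead of A's single stateful scan that compares each row to a tracked current_channels and emits ranges inline at change points.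
import Mathlib
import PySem

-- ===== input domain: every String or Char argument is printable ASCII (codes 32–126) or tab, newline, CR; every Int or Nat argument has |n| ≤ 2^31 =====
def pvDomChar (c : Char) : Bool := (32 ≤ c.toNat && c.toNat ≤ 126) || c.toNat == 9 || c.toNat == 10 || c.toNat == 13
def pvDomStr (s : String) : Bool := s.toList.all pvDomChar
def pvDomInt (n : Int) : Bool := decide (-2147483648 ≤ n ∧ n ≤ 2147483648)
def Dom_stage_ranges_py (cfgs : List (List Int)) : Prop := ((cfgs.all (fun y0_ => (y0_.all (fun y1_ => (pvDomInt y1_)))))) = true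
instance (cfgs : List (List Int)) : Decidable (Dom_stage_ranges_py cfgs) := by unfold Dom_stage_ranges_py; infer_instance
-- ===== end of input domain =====

-- B replaces A's single stateful change-detection scan by a two-stage run-length
-- decomposition: a chunk scan collecting run lengths, then a prefix-sum pass into ranges.


-- cfg[2] of a config row (total: default 0; Pre_ guarantees the index is in range)
def pvThird (row : List Int) : Int := (PySem.List.pyGet? row 2).getD 0

-- ===== PORT A =====
-- A's for-loop over enumerate(cfgs[1:], start=1) with state (ranges, start, current_channels)
def pvALoop (t : List (List Int)) (cur start idx : Int) (ranges : List (Int × Int)) :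
    List (Int × Int) × Int :=
  match t with
  | [] => (ranges, start)
  | cfg :: rest =>
      if pvThird cfg ≠ cur then
        pvALoop rest (pvThird cfg) idx (idx + 1) (ranges ++ [(start, idx)])
      else
        pvALoop rest cur start (idx + 1) ranges

def stage_ranges_py (cfgs : List (List Int)) : List (Int × Int) :=
  let res := pvALoop (cfgs.drop 1) (pvThird (cfgs.headD [])) 0 1 []
  res.1 ++ [(res.2, (cfgs.length : Int))]

-- ===== PORT B =====
-- B's inner while: number of further rows after the block head whose channel count equals ch
def pvRun (ch : Int) (t : List (List Int)) : Nat :=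
  match t with
  | [] => 0
  | r :: rest => if pvThird r = ch then 1 + pvRun ch rest else 0

-- B's outer chunk loop: the list of lengths of the maximal equal-channel blocks
def pvRunLengths : List (List Int) → List Nat
  | [] => []
  | r :: tail =>
      (1 + pvRun (pvThird r) tail) :: pvRunLengths (tail.drop (pvRun (pvThird r) tail))
termination_by t => t.length
decreasing_by simp [List.length_drop]


-- B's second pass: prefix-sum the run lengths into (start, start + len) ranges
def pvRanges : List Nat → Int → List (Int × Int)
  | [], _ => []
  | n :: rest, start => (start, start + (n : Int)) :: pvRanges rest (start + (n : Int))

def stage_ranges_py_alt (cfgs : List (List Int)) : List (Int × Int) :=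
  pvRanges (pvRunLengths cfgs) 0

-- ===== PRECONDITION & SPEC =====
-- A raises IndexError on empty cfgs (cfgs[0]) and on any row shorter than 3 (cfg[2]); excluded.
def Pre_stage_ranges_py (cfgs : List (List Int)) : Prop :=
  cfgs ≠ [] ∧ ∀ row ∈ cfgs, 3 ≤ row.length
instance (cfgs : List (List Int)) : Decidable (Pre_stage_ranges_py cfgs) := by
  unfold Pre_stage_ranges_py; infer_instance
def pvWitness_stage_ranges_py : List (List Int) := [[1, 2, 3], [4, 5, 3], [6, 7, 8]]

def Spec_stage_ranges_py (cfgs : List (List Int)) (out : List (Int × Int)) : Prop := out = stage_ranges_py_alt cfgs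
instance (cfgs : List (List Int)) (out : List (Int × Int)) : Decidable (Spec_stage_ranges_py cfgs out) := by unfold Spec_stage_ranges_py; infer_instance

-- ===== CLAIM (what is proved, stated in full; the proofs are below) =====
def Claim_equal_stage_ranges_py : Prop := ∀ (cfgs : List (List Int)), Dom_stage_ranges_py cfgs → Pre_stage_ranges_py cfgs → Spec_stage_ranges_py cfgs (stage_ranges_py cfgs)

-- ===== LEMMAS AND PROOFS =====

-- A's loop, closed off with the final range at index i + |t|, equals the range of the
-- current run followed by B's ranges of the remaining runs.
theorem pvKey (t : List (List Int)) : ∀ (ch s i : Int) (r : List (Int × Int)),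
    (pvALoop t ch s i r).1 ++ [((pvALoop t ch s i r).2, i + (t.length : Int))] =
      r ++ (s, i + (pvRun ch t : Int)) ::
        pvRanges (pvRunLengths (t.drop (pvRun ch t))) (i + (pvRun ch t : Int)) := by
  induction t with
  | nil =>
      intro ch s i r
      simp only [pvALoop, pvRun, List.drop_nil, List.length_nil, Nat.cast_zero, add_zero]
      simp only [pvRunLengths]
      simp [pvRanges]
  | cons cfg rest ih =>
      intro ch s i r
      by_cases h : pvThird cfg = ch
      · simp only [pvALoop, pvRun, List.length_cons, if_neg (not_not_intro h), if_pos h]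
        have e1 : (i + ↑(rest.length + 1) : Int) = (i + 1) + ↑rest.length := by push_cast; ring
        have e2 : (i + ↑(1 + pvRun ch rest) : Int) = (i + 1) + ↑(pvRun ch rest) := by
          push_cast; ring
        have e3 : List.drop (1 + pvRun ch rest) (cfg :: rest) = rest.drop (pvRun ch rest) := by
          rw [Nat.add_comm, List.drop_succ_cons]
        rw [e1, e2, e3]
        exact ih ch s (i + 1) r
      · simp only [pvALoop, pvRun, List.length_cons, if_pos h, if_neg h]
        have e1 : (i + ↑(rest.length + 1) : Int) = (i + 1) + ↑rest.length := by push_cast; ring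
        rw [e1, ih (pvThird cfg) i (i + 1) (r ++ [(s, i)])]
        simp only [List.drop_zero, Nat.cast_zero, add_zero]
        simp only [pvRunLengths]
        simp [pvRanges, add_assoc]

-- ===== VERDICT (by name: the statement is the Claim_ definition above) =====
theorem stage_ranges_py_spec : Claim_equal_stage_ranges_py := by
  intro cfgs _ hpre
  unfold Spec_stage_ranges_py stage_ranges_py stage_ranges_py_alt
  obtain ⟨hne, -⟩ := hpre
  match cfgs, hne with
  | p :: t, _ =>
    simp only [List.drop_one, List.tail_cons, List.headD_cons, List.length_cons]
    have e1 : ((t.length + 1 : Nat) : Int) = 1 + ↑t.length := by push_cast; ring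
    rw [e1, pvKey t (pvThird p) 0 1 []]; simp only [pvRunLengths]
    simp [pvRanges]
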